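-- pv_equiv track=rewrite | github.com/caleblevy/funcstructs | rotation.py | smallest_rotation
-- ===== SOURCE A (Python) =====
-- from collections import deque
--
-- def smallest_rotation(lst):
--     """Return the lexicographically smallest rotation of a list."""
--     lst = list(lst)
--     minrot = deque(lst)
--     cycle = deque(lst)
--     for I in range(len(lst)-1):
--         cycle.rotate()
--         if list(minrot) > list(cycle):
--             minrot = list(deque(cycle))
--     return list(minrot)
-- ===== SOURCE B (Python) =====
-- def smallest_rotation(lst):
--     """Return the lexicographically smallest rotation of a list.
--
--     Candidate-elimination algorithm: keep the set of start indices still in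
--     contention; at column j keep only the candidates whose j-th rotation
--     element equals the column minimum. After n columns every survivor's
--     rotation equals the lexicographic minimum; take the first survivor.
--     """
--     lst = list(lst)
--     n = len(lst)
--     if n == 0:
--         return []
--     cand = list(range(n))
--     for j in range(n):
--         m = min(lst[(i + j) % n] for i in cand)
--         cand = [i for i in cand if lst[(i + j) % n] == m]
--     i = cand[0]
--     return lst[i:] + lst[:i]
-- ===== Notes on version B (the rewrite author's own statement) =====
-- stated objective: alternative
-- what changed: Replaces A's rotate-the-deque-and-compare-whole-rotations loop with candidate elimination: the set of start indices is filtered column by column against the column minimum, so no rotation is ever materialized or compared as a whole.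
import Mathlib
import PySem

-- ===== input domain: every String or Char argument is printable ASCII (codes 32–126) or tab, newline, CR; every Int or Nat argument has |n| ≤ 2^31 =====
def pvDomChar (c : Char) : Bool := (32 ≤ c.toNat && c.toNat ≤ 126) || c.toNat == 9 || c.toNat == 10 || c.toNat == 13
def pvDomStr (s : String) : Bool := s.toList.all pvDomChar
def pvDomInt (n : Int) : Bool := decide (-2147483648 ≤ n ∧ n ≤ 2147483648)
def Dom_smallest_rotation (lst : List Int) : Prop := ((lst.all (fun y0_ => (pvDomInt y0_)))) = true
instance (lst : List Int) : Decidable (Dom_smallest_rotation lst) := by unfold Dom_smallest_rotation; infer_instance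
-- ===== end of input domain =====

-- B replaces A's rotate-and-compare-whole-rotations loop with candidate elimination: the set of
-- start indices is filtered column by column against the column minimum, so no rotation is ever
-- materialized or compared as a whole (alternative algorithm; same worst-case cost).

-- ===== PORT A =====
-- deque.rotate(1): move the last element to the front (no-op on the empty deque)
def pyRotate1 (c : List Int) : List Int :=
  c.drop (c.length - 1) ++ c.take (c.length - 1)

def smallest_rotation (lst : List Int) : List Int :=
  ((PySem.List.pyRange 0 ((lst.length : Int) - 1) 1).foldl
    (fun (st : List Int × List Int) _ =>
      let cycle := pyRotate1 st.2
      if st.1 > cycle then (cycle, cycle) else (st.1, cycle))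
    (lst, lst)).1

-- ===== PORT B =====
-- loop body of Source B: m = min(lst[(i+j) % n] for i in cand); cand = [i for i in cand if lst[(i+j) % n] == m].
-- All indices (i+j) % n lie in [0, n), so plain getD is exact; cand is nonempty throughout the loop,
-- so the `none` branch of the min is unreachable.
def pvBStep (lst : List Int) (n : Nat) (cand : List Nat) (j : Nat) : List Nat :=
  let m : Int :=
    match PySem.List.min? (cand.map (fun i => lst.getD ((i + j) % n) 0)) (fun v => v) with
    | some v => v
    | none => 0
  cand.filter (fun i => lst.getD ((i + j) % n) 0 == m)

def smallest_rotation_alt (lst : List Int) : List Int :=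
  let n := lst.length
  if n = 0 then []
  else
    let cand := (List.range n).foldl (pvBStep lst n) (List.range n)
    let i := cand.headD 0
    -- lst[i:] + lst[:i] with 0 ≤ i < n: slices are exact as drop/take here
    lst.drop i ++ lst.take i

-- ===== PRECONDITION & SPEC =====
def Spec_smallest_rotation (lst : List Int) (out : List Int) : Prop := out = smallest_rotation_alt lst
instance (lst : List Int) (out : List Int) : Decidable (Spec_smallest_rotation lst out) := by unfold Spec_smallest_rotation; infer_instance

-- ===== CLAIM (what is proved, stated in full; the proofs are below) =====
def Claim_equal_smallest_rotation : Prop := ∀ (lst : List Int), Dom_smallest_rotation lst → Spec_smallest_rotation lst (smallest_rotation lst)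

-- ===== LEMMAS AND PROOFS =====

-- left rotation by i
def pvRot (lst : List Int) (i : Nat) : List Int := lst.drop i ++ lst.take i

-- A's loop body as a function of the state alone
def pvStep (st : List Int × List Int) : List Int × List Int :=
  let cycle := pyRotate1 st.2
  if st.1 > cycle then (cycle, cycle) else (st.1, cycle)

lemma pyRotate1_pvRot (lst : List Int) (j : Nat) (h : j + 1 ≤ lst.length) :
    pyRotate1 (pvRot lst (j + 1)) = pvRot lst j := by
  unfold pyRotate1 pvRot
  have hlen : (lst.drop (j+1) ++ lst.take (j+1)).length = lst.length := by simp; omega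
  rw [hlen]
  rw [List.drop_append, List.take_append]
  have h1 : (lst.drop (j+1)).length = lst.length - (j+1) := by simp
  rw [h1]
  have h2 : lst.length - 1 - (lst.length - (j+1)) = j := by omega
  rw [h2]
  have h3 : (lst.drop (j+1)).drop (lst.length - 1) = [] := by
    simp; omega
  have h4 : (lst.drop (j+1)).take (lst.length - 1) = lst.drop (j+1) := by
    apply List.take_of_length_le; simp; omega
  rw [h3, h4, List.drop_take, List.take_take]
  have h5 : min j (j+1) = j := by omega
  have h6 : j + 1 - j = 1 := by omega
  rw [h5, h6]
  have h7 : lst.drop j = (lst.drop j).take 1 ++ lst.drop (j+1) := by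
    conv_lhs => rw [← List.take_append_drop 1 (lst.drop j)]
    rw [List.drop_drop]
  rw [List.nil_append, ← List.append_assoc, ← h7]

lemma pvRot_length_self (lst : List Int) : pvRot lst lst.length = lst := by
  simp [pvRot]

lemma pvStep_invariant (lst : List Int) (h1 : 1 ≤ lst.length) :
    ∀ (k : Nat), k ≤ lst.length - 1 →
    (pvStep^[k] (lst, lst)).2 = pvRot lst (lst.length - k) ∧
    (pvStep^[k] (lst, lst)).1 ∈ (List.range (k + 1)).map (fun j => pvRot lst (lst.length - j)) ∧
    ∀ y ∈ (List.range (k + 1)).map (fun j => pvRot lst (lst.length - j)),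
      (pvStep^[k] (lst, lst)).1 ≤ y := by
  intro k
  induction k with
  | zero =>
      intro _
      refine ⟨by simp [pvRot_length_self], by simp [pvRot_length_self], ?_⟩
      intro y hy
      simp [pvRot_length_self] at hy
      simp [hy]
  | succ k ih =>
      intro hk
      obtain ⟨ih2, ih1, ihmin⟩ := ih (by omega)
      have hc : pyRotate1 (pvStep^[k] (lst, lst)).2 = pvRot lst (lst.length - (k + 1)) := by
        rw [ih2]
        have he : lst.length - k = (lst.length - (k + 1)) + 1 := by omega
        rw [he, pyRotate1_pvRot lst _ (by omega)]
      have hrange : (List.range (k + 1 + 1)).map (fun j => pvRot lst (lst.length - j)) =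
          (List.range (k + 1)).map (fun j => pvRot lst (lst.length - j)) ++
            [pvRot lst (lst.length - (k + 1))] := by
        rw [List.range_succ, List.map_append]; rfl
      have hstep : pvStep (pvStep^[k] (lst, lst)) =
          if (pvStep^[k] (lst, lst)).1 > pvRot lst (lst.length - (k + 1)) then
            (pvRot lst (lst.length - (k + 1)), pvRot lst (lst.length - (k + 1)))
          else ((pvStep^[k] (lst, lst)).1, pvRot lst (lst.length - (k + 1))) := by
        simp only [pvStep, hc]
      rw [Function.iterate_succ_apply', hstep]
      split_ifs with hgt
      · refine ⟨rfl, ?_, ?_⟩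
        · rw [hrange]; simp
        · intro y hy
          rw [hrange] at hy
          rcases List.mem_append.1 hy with hy | hy
          · exact le_of_lt (lt_of_lt_of_le hgt (ihmin y hy))
          · simp at hy; simp [hy]
      · refine ⟨rfl, ?_, ?_⟩
        · rw [hrange]; simp only [List.mem_append]; left; exact ih1
        · intro y hy
          rw [hrange] at hy
          rcases List.mem_append.1 hy with hy | hy
          · exact ihmin y hy
          · simp at hy; rw [hy]; exact not_lt.1 hgt

lemma foldl_const_iterate {α β : Type} (g : α → α) :
    ∀ (l : List β) (s : α), l.foldl (fun st _ => g st) s = g^[l.length] s := by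
  intro l
  induction l with
  | nil => intro s; rfl
  | cons x t ih =>
      intro s
      simp [List.foldl, ih, Function.iterate_succ_apply]

lemma smallest_rotation_eq_iterate (lst : List Int) :
    smallest_rotation lst = (pvStep^[lst.length - 1] (lst, lst)).1 := by
  unfold smallest_rotation
  rw [show (fun (st : List Int × List Int) (_ : Int) =>
      let cycle := pyRotate1 st.2
      if st.1 > cycle then (cycle, cycle) else (st.1, cycle)) = fun st _ => pvStep st from rfl]
  rw [foldl_const_iterate]
  have hl : (PySem.List.pyRange 0 ((lst.length : Int) - 1) 1).length = lst.length - 1 := by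
    rw [PySem.List.length_pyRange_one]; omega
  rw [hl]

-- ---- lexicographic-order toolbox (for the order on List Int) ----

lemma pvLtCC (x y : Int) (s t : List Int) : x :: s < y :: t ↔ x < y ∨ (x = y ∧ s < t) := by
  constructor
  · intro h
    cases h with
    | cons h => exact Or.inr ⟨rfl, h⟩
    | rel h => exact Or.inl h
  · rintro (h | ⟨rfl, h⟩)
    · exact List.Lex.rel h
    · exact List.Lex.cons h

lemma pvNilLe (l : List Int) : ([] : List Int) ≤ l := by
  cases l with
  | nil => exact le_refl _
  | cons a t => exact le_of_lt (List.Lex.nil)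

lemma pvLeCC (x y : Int) (s t : List Int) : x :: s ≤ y :: t ↔ x < y ∨ (x = y ∧ s ≤ t) := by
  rw [le_iff_lt_or_eq, le_iff_lt_or_eq, pvLtCC]
  constructor
  · rintro (⟨h|⟨rfl,h⟩⟩|h)
    · exact Or.inl h
    · exact Or.inr ⟨rfl, Or.inl h⟩
    · rcases List.cons.inj h with ⟨rfl, rfl⟩; exact Or.inr ⟨rfl, Or.inr rfl⟩
  · rintro (h|⟨rfl,h|rfl⟩)
    · exact Or.inl (Or.inl h)
    · exact Or.inl (Or.inr ⟨rfl, h⟩)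
    · exact Or.inr rfl

lemma pvNotConsLeNil (x : Int) (s : List Int) : ¬ (x :: s ≤ ([] : List Int)) := by
  intro h
  rcases le_iff_lt_or_eq.1 h with h | h
  · cases h
  · exact absurd h (by simp)

lemma pvTakeMono : ∀ (j : Nat) (a b : List Int), a ≤ b → a.take j ≤ b.take j := by
  intro j
  induction j with
  | zero => intro a b _; simp
  | succ j ih =>
    intro a b h
    cases a with
    | nil => exact pvNilLe _
    | cons x s =>
      cases b with
      | nil => exact absurd h (pvNotConsLeNil x s)
      | cons y t =>
        rw [List.take_succ_cons, List.take_succ_cons]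
        rcases (pvLeCC x y s t).1 h with h2 | ⟨rfl, h2⟩
        · exact le_of_lt (List.Lex.rel h2)
        · exact (pvLeCC x x (s.take j) (t.take j)).2 (Or.inr ⟨rfl, ih s t h2⟩)

lemma pvAppLe : ∀ (p : List Int) (x y : Int), p ++ [x] ≤ p ++ [y] ↔ x ≤ y := by
  intro p
  induction p with
  | nil =>
    intro x y
    rw [List.nil_append, List.nil_append, pvLeCC]
    constructor
    · rintro (h | ⟨rfl, _⟩)
      · exact le_of_lt h
      · exact le_refl _
    · intro h
      rcases lt_or_eq_of_le h with h | rfl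
      · exact Or.inl h
      · exact Or.inr ⟨rfl, le_refl _⟩
  | cons a p ih =>
    intro x y
    rw [List.cons_append, List.cons_append, pvLeCC]
    constructor
    · rintro (h | ⟨_, h⟩)
      · exact absurd h (lt_irrefl a)
      · exact (ih x y).1 h
    · intro h; exact Or.inr ⟨rfl, (ih x y).2 h⟩

-- useful corollary: a (j+1)-prefix comparison implies the j-prefix comparison
lemma pvTakeMonoSucc (j : Nat) (a b : List Int) (h : a.take (j+1) ≤ b.take (j+1)) :
    a.take j ≤ b.take j := by
  have := pvTakeMono j _ _ h
  rw [List.take_take, List.take_take] at this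
  have hm : min j (j+1) = j := by omega
  rwa [hm] at this

-- ---- rotations, element access, prefixes ----

lemma pvRotLen (lst : List Int) (i : Nat) (h : i ≤ lst.length) :
    (pvRot lst i).length = lst.length := by
  simp [pvRot]; omega

lemma pvGetRot (lst : List Int) (i j : Nat) (hi : i < lst.length) (hj : j < lst.length) :
    lst.getD ((i + j) % lst.length) 0 = (pvRot lst i).getD j 0 := by
  have hn : 0 < lst.length := by omega
  have hmod : (i + j) % lst.length < lst.length := Nat.mod_lt _ hn
  have hjr : j < (pvRot lst i).length := by rw [pvRotLen lst i (le_of_lt hi)]; exact hj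
  rw [List.getD_eq_getElem lst 0 hmod, List.getD_eq_getElem _ 0 hjr]
  unfold pvRot
  by_cases hcase : j < lst.length - i
  · have hlt : j < (lst.drop i).length := by simp; omega
    have hidx : (i + j) % lst.length = i + j := Nat.mod_eq_of_lt (by omega)
    rw [List.getElem_append_left hlt, List.getElem_drop]
    simp only [hidx]
  · have hge : (lst.drop i).length ≤ j := by simp; omega
    rw [List.getElem_append_right hge, List.getElem_take]
    have hlen' : (lst.drop i).length = lst.length - i := by simp
    have hidx : (i + j) % lst.length = j - (lst.length - i) := by
      rw [Nat.mod_eq_sub_mod (by omega : lst.length ≤ i + j),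
        Nat.mod_eq_of_lt (by omega)]
      omega
    simp only [hlen', hidx]

lemma pvTakeSuccGetD (a : List Int) (j : Nat) (h : j < a.length) :
    a.take (j+1) = a.take j ++ [a.getD j 0] := by
  rw [List.take_add_one, List.getElem?_eq_getElem h, List.getD_eq_getElem a 0 h]
  rfl

-- ---- B's loop invariant: cand is exactly the set of starts with minimal j-prefix ----

def pvInv (lst : List Int) (j : Nat) (cand : List Nat) : Prop :=
  cand ≠ [] ∧ ∀ i : Nat, i ∈ cand ↔
    (i < lst.length ∧ ∀ k, k < lst.length → (pvRot lst i).take j ≤ (pvRot lst k).take j)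

lemma pvInv_init (lst : List Int) (h : lst ≠ []) : pvInv lst 0 (List.range lst.length) := by
  constructor
  · simp [List.range_eq_nil]
    cases lst with
    | nil => exact absurd rfl h
    | cons a t => simp
  · intro i
    simp only [List.mem_range, List.take_zero]
    constructor
    · intro hi; exact ⟨hi, fun k _ => le_refl _⟩
    · intro hi; exact hi.1

lemma pvBStep_eq (lst : List Int) (n : Nat) (cand : List Nat) (j : Nat) (m : Int)
    (hm : PySem.List.min? (cand.map (fun i => lst.getD ((i + j) % n) 0)) (fun v => v) = some m) :
    pvBStep lst n cand j = cand.filter (fun i => lst.getD ((i + j) % n) 0 == m) := by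
  unfold pvBStep
  rw [hm]

lemma pvInv_step (lst : List Int) (j : Nat) (hj : j < lst.length)
    (cand : List Nat) (h : pvInv lst j cand) :
    pvInv lst (j+1) (pvBStep lst lst.length cand j) := by
  obtain ⟨hne, hiff⟩ := h
  -- the column minimum exists
  have hcolne : cand.map (fun i => lst.getD ((i + j) % lst.length) 0) ≠ [] := by
    intro hc; exact hne (List.map_eq_nil_iff.1 hc)
  obtain ⟨m, hm⟩ : ∃ m, PySem.List.min?
      (cand.map (fun i => lst.getD ((i + j) % lst.length) 0)) (fun v => v) = some m := by
    cases hmin : PySem.List.min?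
        (cand.map (fun i => lst.getD ((i + j) % lst.length) 0)) (fun v => v) with
    | none => exact absurd ((PySem.List.min?_eq_none_iff _ _).1 hmin) hcolne
    | some m => exact ⟨m, rfl⟩
  obtain ⟨i0, hi0c, hi0⟩ := List.mem_map.1 (PySem.List.min?_mem hm)
  have hmlb : ∀ i ∈ cand, m ≤ lst.getD ((i + j) % lst.length) 0 := by
    intro i hi
    exact PySem.List.min?_isMin hm _ (List.mem_map_of_mem hi)
  rw [pvBStep_eq lst lst.length cand j m hm]
  have hmemfilter : ∀ i : Nat,
      i ∈ cand.filter (fun i => lst.getD ((i + j) % lst.length) 0 == m) ↔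
      i ∈ cand ∧ lst.getD ((i + j) % lst.length) 0 = m := by
    intro i; rw [List.mem_filter, beq_iff_eq]
  -- all candidates share the same j-prefix
  have hpref : ∀ i ∈ cand, ∀ k ∈ cand, (pvRot lst i).take j = (pvRot lst k).take j := by
    intro i hi k hk
    have h1 := (hiff i).1 hi
    have h2 := (hiff k).1 hk
    exact le_antisymm (h1.2 k h2.1) (h2.2 i h1.1)
  -- prefix extension
  have hTS : ∀ i, i < lst.length →
      (pvRot lst i).take (j+1) = (pvRot lst i).take j ++ [lst.getD ((i + j) % lst.length) 0] := by
    intro i hi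
    rw [pvTakeSuccGetD _ _ (by rw [pvRotLen lst i (le_of_lt hi)]; exact hj),
      pvGetRot lst i j hi hj]
  constructor
  · -- nonempty: the witness of the minimum survives the filter
    exact List.ne_nil_of_mem ((hmemfilter i0).2 ⟨hi0c, hi0⟩)
  · intro i
    rw [hmemfilter i]
    constructor
    · rintro ⟨hic, hfi⟩
      obtain ⟨hin, hminj⟩ := (hiff i).1 hic
      refine ⟨hin, ?_⟩
      intro k hk
      by_cases hkc : k ∈ cand
      · rw [hTS i hin, hTS k hk, hpref i hic k hkc]
        apply (pvAppLe _ _ _).2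
        rw [hfi]
        exact hmlb k hkc
      · have hknotmin : ¬ ∀ k', k' < lst.length →
            (pvRot lst k).take j ≤ (pvRot lst k').take j := by
          intro hc; exact hkc ((hiff k).2 ⟨hk, hc⟩)
        have h1 : ¬ ((pvRot lst k).take j ≤ (pvRot lst i).take j) := by
          intro hle
          exact hknotmin (fun k' hk' => le_trans hle (hminj k' hk'))
        by_contra hcon
        exact h1 (pvTakeMonoSucc j _ _ (le_of_not_ge hcon))
    · rintro ⟨hin, hminj1⟩
      have hic : i ∈ cand := by
        apply (hiff i).2
        exact ⟨hin, fun k hk => pvTakeMonoSucc j _ _ (hminj1 k hk)⟩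
      refine ⟨hic, ?_⟩
      have hi0lt : i0 < lst.length := ((hiff i0).1 hi0c).1
      have h1 := hminj1 i0 hi0lt
      rw [hTS i hin, hTS i0 hi0lt, hpref i hic i0 hi0c] at h1
      have h2 := (pvAppLe _ _ _).1 h1
      rw [hi0] at h2
      exact le_antisymm h2 (hmlb i hic)

lemma pvInv_fold (lst : List Int) (h : lst ≠ []) :
    pvInv lst lst.length
      ((List.range lst.length).foldl (pvBStep lst lst.length) (List.range lst.length)) := by
  suffices H : ∀ J, J ≤ lst.length →
      pvInv lst J ((List.range J).foldl (pvBStep lst lst.length) (List.range lst.length)) from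
    H lst.length le_rfl
  intro J
  induction J with
  | zero => intro _; exact pvInv_init lst h
  | succ J ih =>
    intro hJ
    rw [List.range_succ, List.foldl_append, List.foldl_cons, List.foldl_nil]
    exact pvInv_step lst J (by omega) _ (ih (by omega))

lemma pvTakeRotFull (lst : List Int) (k : Nat) (h : k ≤ lst.length) :
    (pvRot lst k).take lst.length = pvRot lst k := by
  apply List.take_of_length_le
  rw [pvRotLen lst k h]

-- ===== VERDICT (by name: the statement is the Claim_ definition above) =====
theorem smallest_rotation_spec : Claim_equal_smallest_rotation := by
  intro lst _
  unfold Spec_smallest_rotation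
  by_cases hnil : lst = []
  · subst hnil; rfl
  · have hN : 1 ≤ lst.length := by
      cases lst with | nil => exact absurd rfl hnil | cons a t => simp
    unfold smallest_rotation_alt
    have hne : ¬ (lst.length = 0) := by omega
    rw [if_neg hne]
    obtain ⟨hcne, hiff⟩ := pvInv_fold lst hnil
    set cand := (List.range lst.length).foldl (pvBStep lst lst.length) (List.range lst.length)
      with hcand
    -- the head of the final candidate list
    have hheadmem : cand.headD 0 ∈ cand := by
      cases hc : cand with
      | nil => exact absurd hc hcne
      | cons c cs => simp
    obtain ⟨hi0n, hi0min⟩ := (hiff (cand.headD 0)).1 hheadmem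
    -- B's output is the rotation at the head candidate, minimal among all rotations
    have hBmin : ∀ k, k < lst.length → pvRot lst (cand.headD 0) ≤ pvRot lst k := by
      intro k hk
      have := hi0min k hk
      rwa [pvTakeRotFull lst _ (le_of_lt hi0n), pvTakeRotFull lst k (le_of_lt hk)] at this
    -- A's output: member of the rotation set and minimal over it
    rw [smallest_rotation_eq_iterate]
    obtain ⟨_, hmem, hmin⟩ := pvStep_invariant lst hN (lst.length - 1) (le_refl _)
    have hNr : lst.length - 1 + 1 = lst.length := by omega
    rw [hNr] at hmem hmin
    set mA := (pvStep^[lst.length - 1] (lst, lst)).1 with hmA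
    show mA = lst.drop (cand.headD 0) ++ lst.take (cand.headD 0)
    have hgoal : mA = pvRot lst (cand.headD 0) := by
      apply le_antisymm
      · -- mA ≤ the rotation at the head candidate
        by_cases hi00 : cand.headD 0 = 0
        · have h0 : pvRot lst (lst.length - 0) ∈
              (List.range lst.length).map (fun j => pvRot lst (lst.length - j)) :=
            List.mem_map.2 ⟨0, List.mem_range.2 (by omega), rfl⟩
          have h := hmin _ h0
          rw [Nat.sub_zero, pvRot_length_self] at h
          rw [hi00]
          simpa [pvRot] using h
        · have h0 : pvRot lst (cand.headD 0) ∈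
              (List.range lst.length).map (fun j => pvRot lst (lst.length - j)) := by
            apply List.mem_map.2
            refine ⟨lst.length - cand.headD 0, List.mem_range.2 (by omega), ?_⟩
            congr 1; omega
          exact hmin _ h0
      · -- the head candidate's rotation ≤ mA
        obtain ⟨j, hj, hjeq⟩ := List.mem_map.1 hmem
        have hjlt := List.mem_range.1 hj
        by_cases hj0 : j = 0
        · subst hj0
          rw [Nat.sub_zero, pvRot_length_self] at hjeq
          have h := hBmin 0 (by omega)
          rw [← hjeq]
          simpa [pvRot] using h
        · rw [← hjeq]
          exact hBmin (lst.length - j) (by omega)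
    rw [hgoal]; rfl
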